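-- pv_equiv track=rewrite | github.com/nagsujosh/Belief-PDDL | scripts/extract_collapse_windows.py | find_collapse_index
-- ===== SOURCE A (Python) =====
-- def find_collapse_index(trace):
--     solvable = [step.get("solvable_worlds", 0) for step in trace]
--     for idx in range(1, len(trace) - 1):
--         if solvable[idx - 1] > 0 and solvable[idx] == 0 and solvable[idx + 1] == 0:
--             return idx
--     for idx in range(1, len(trace)):
--         if solvable[idx - 1] > 0 and solvable[idx] == 0:
--             return idx
--     return None
-- ===== SOURCE B (Python) =====
-- def find_collapse_index(trace):
--     n = len(trace)
--     first_single = None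
--     for idx in range(1, n):
--         prev = trace[idx - 1].get("solvable_worlds", 0)
--         cur = trace[idx].get("solvable_worlds", 0)
--         if idx <= n - 2 and prev > 0 and cur == 0 and trace[idx + 1].get("solvable_worlds", 0) == 0:
--             return idx
--         if first_single is None and prev > 0 and cur == 0:
--             first_single = idx
--     return first_single
-- ===== Notes on version B (the rewrite author's own statement) =====
-- stated objective: alternative
-- what changed: B replaces A's precomputed solvable list plus two sequential scans (double-collapse pass, then single-transition pass) by one single pass that reads solvable via step.get on the fly, returns immediately on a double collapse and remembers the first single transition in a variable.
import Mathlib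
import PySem

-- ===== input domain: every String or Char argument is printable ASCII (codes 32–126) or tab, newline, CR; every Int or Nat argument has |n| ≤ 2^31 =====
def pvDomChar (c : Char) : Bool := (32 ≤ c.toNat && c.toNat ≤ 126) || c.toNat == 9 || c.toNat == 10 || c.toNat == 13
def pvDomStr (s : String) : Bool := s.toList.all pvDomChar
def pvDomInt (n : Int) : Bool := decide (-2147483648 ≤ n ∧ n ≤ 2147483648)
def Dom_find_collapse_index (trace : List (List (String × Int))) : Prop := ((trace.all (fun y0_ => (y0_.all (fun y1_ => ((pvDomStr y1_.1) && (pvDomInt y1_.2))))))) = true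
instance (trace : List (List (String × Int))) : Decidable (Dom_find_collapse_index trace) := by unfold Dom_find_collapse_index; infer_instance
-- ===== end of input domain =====

-- B is a structurally different single-pass re-implementation (no precomputed list, one scan
-- instead of two, double-collapse returns immediately, first single transition remembered);
-- same cost class, objective: alternative decomposition.

-- ===== PORT A =====
-- A: build the solvable list, then two scans (range(1,n-1) for a double collapse,
-- then range(1,n) for a single transition).
def find_collapse_index (trace : List (List (String × Int))) : Option Int :=
  let solvable := trace.map (fun step => (PySem.Dict.mk step).getD "solvable_worlds" 0)
  let n := trace.length
  match (List.range' 1 (n - 2)).findSome? (fun idx =>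
      if solvable.getD (idx - 1) 0 > 0 ∧ solvable.getD idx 0 = 0 ∧ solvable.getD (idx + 1) 0 = 0
      then some (idx : Int) else none) with
  | some i => some i
  | none =>
    (List.range' 1 (n - 1)).findSome? (fun idx =>
      if solvable.getD (idx - 1) 0 > 0 ∧ solvable.getD idx 0 = 0
      then some (idx : Int) else none)

-- ===== PORT B =====
-- B helper: solvable count of step i, read on the fly (step.get with default 0).
def pvSvAt (trace : List (List (String × Int))) (i : Nat) : Int :=
  (PySem.Dict.mk (trace.getD i [])).getD "solvable_worlds" 0

-- B's single loop over idx = 1 .. n-1 carrying first_single.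
def pvAltGo (trace : List (List (String × Int))) (n : Nat) :
    List Nat → Option Int → Option Int
  | [], first_single => first_single
  | idx :: rest, first_single =>
    let prev := pvSvAt trace (idx - 1)
    let cur := pvSvAt trace idx
    if idx ≤ n - 2 ∧ prev > 0 ∧ cur = 0 ∧ pvSvAt trace (idx + 1) = 0 then
      some (idx : Int)
    else if first_single.isNone ∧ prev > 0 ∧ cur = 0 then
      pvAltGo trace n rest (some (idx : Int))
    else
      pvAltGo trace n rest first_single

def find_collapse_index_alt (trace : List (List (String × Int))) : Option Int :=
  pvAltGo trace trace.length (List.range' 1 (trace.length - 1)) none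

-- ===== PRECONDITION & SPEC =====
def Spec_find_collapse_index (trace : List (List (String × Int))) (out : Option Int) : Prop := out = find_collapse_index_alt trace
instance (trace : List (List (String × Int))) (out : Option Int) : Decidable (Spec_find_collapse_index trace out) := by unfold Spec_find_collapse_index; infer_instance

-- ===== CLAIM (what is proved, stated in full; the proofs are below) =====
def Claim_equal_find_collapse_index : Prop := ∀ (trace : List (List (String × Int))), Dom_find_collapse_index trace → Spec_find_collapse_index trace (find_collapse_index trace)

-- ===== LEMMAS AND PROOFS =====

-- reading A's precomputed list equals reading on the fly (an out-of-range index gives the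
-- empty dict, whose .get default is 0 — both loops only use in-range indices anyway)
theorem pvSvAt_eq_map (trace : List (List (String × Int))) (i : Nat) :
    (trace.map (fun step => (PySem.Dict.mk step).getD "solvable_worlds" 0)).getD i 0
      = pvSvAt trace i := by
  unfold pvSvAt
  simp only [List.getD_eq_getElem?_getD, List.getElem?_map]
  induction trace generalizing i with
  | nil => rfl
  | cons h t ih =>
    cases i with
    | zero => rfl
    | succ j => exact ih j

theorem findSome?_congr {α β : Type} (f g : α → Option β) :
    ∀ (L : List α), (∀ x ∈ L, f x = g x) → L.findSome? f = L.findSome? g := by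
  intro L
  induction L with
  | nil => intro _; rfl
  | cons a t ih =>
    intro h
    simp only [List.findSome?_cons, h a (by simp)]
    cases g a with
    | some b => rfl
    | none => exact ih (fun x hx => h x (by simp [hx]))

-- characterization of B's loop: first double in the list, else the accumulator, else first single
theorem pvAltGo_eq (trace : List (List (String × Int))) (n : Nat) :
    ∀ (L : List Nat) (fs : Option Int),
      pvAltGo trace n L fs =
        ((L.findSome? (fun idx =>
            if idx ≤ n - 2 ∧ pvSvAt trace (idx - 1) > 0 ∧ pvSvAt trace idx = 0 ∧
                pvSvAt trace (idx + 1) = 0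
            then some (idx : Int) else none)).orElse (fun _ =>
          fs.orElse (fun _ =>
            L.findSome? (fun idx =>
              if pvSvAt trace (idx - 1) > 0 ∧ pvSvAt trace idx = 0
              then some (idx : Int) else none)))) := by
  intro L
  induction L with
  | nil => intro fs; cases fs <;> simp [pvAltGo]
  | cons idx rest ih =>
    intro fs
    simp only [pvAltGo]
    by_cases hD : idx ≤ n - 2 ∧ pvSvAt trace (idx - 1) > 0 ∧ pvSvAt trace idx = 0 ∧
        pvSvAt trace (idx + 1) = 0
    · simp only [if_pos hD, List.findSome?_cons]
      rfl
    · rw [if_neg hD]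
      by_cases hS : fs.isNone ∧ pvSvAt trace (idx - 1) > 0 ∧ pvSvAt trace idx = 0
      · have hfs : fs = none := by
          cases fs with
          | none => rfl
          | some f => simp at hS
        subst hfs
        rw [if_pos hS, ih]
        simp only [List.findSome?_cons, if_neg hD, if_pos hS.2]
        cases hrest : List.findSome? (fun idx =>
            if idx ≤ n - 2 ∧ pvSvAt trace (idx - 1) > 0 ∧ pvSvAt trace idx = 0 ∧
                pvSvAt trace (idx + 1) = 0
            then some (idx : Int) else none) rest <;> rfl
      · rw [if_neg hS, ih]
        simp only [List.findSome?_cons, if_neg hD]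
        cases fs with
        | some f => rfl
        | none =>
          have hS' : ¬ (pvSvAt trace (idx - 1) > 0 ∧ pvSvAt trace idx = 0) := by
            intro h; exact hS ⟨rfl, h⟩
          simp only [if_neg hS']

-- the bounded double-scan over 1..n-1 equals A's unbounded scan over 1..n-2
theorem double_scan_eq (trace : List (List (String × Int))) :
    (List.range' 1 (trace.length - 1)).findSome? (fun idx =>
        if idx ≤ trace.length - 2 ∧ pvSvAt trace (idx - 1) > 0 ∧ pvSvAt trace idx = 0 ∧
            pvSvAt trace (idx + 1) = 0
        then some (idx : Int) else none)
      = (List.range' 1 (trace.length - 2)).findSome? (fun idx =>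
        if pvSvAt trace (idx - 1) > 0 ∧ pvSvAt trace idx = 0 ∧ pvSvAt trace (idx + 1) = 0
        then some (idx : Int) else none) := by
  set n := trace.length with hn
  rcases Nat.lt_or_ge n 2 with h2 | h2
  · interval_cases n <;> simp [List.range']
  · have hsplit : n - 1 = (n - 2) + 1 := by omega
    rw [hsplit, List.range'_concat, List.findSome?_append]
    have hcongr :
        (List.range' 1 (n - 2)).findSome? (fun idx =>
          if idx ≤ n - 2 ∧ pvSvAt trace (idx - 1) > 0 ∧ pvSvAt trace idx = 0 ∧
              pvSvAt trace (idx + 1) = 0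
          then some (idx : Int) else none)
        = (List.range' 1 (n - 2)).findSome? (fun idx =>
          if pvSvAt trace (idx - 1) > 0 ∧ pvSvAt trace idx = 0 ∧ pvSvAt trace (idx + 1) = 0
          then some (idx : Int) else none) := by
      apply findSome?_congr
      intro x hx
      have hxle : x ≤ n - 2 := by
        have := List.mem_range'.mp hx; omega
      simp [hxle]
    rw [hcongr]
    have hlast : ¬ (1 + (n - 2) ≤ n - 2) := by omega
    cases hfind : (List.range' 1 (n - 2)).findSome? (fun idx =>
        if pvSvAt trace (idx - 1) > 0 ∧ pvSvAt trace idx = 0 ∧ pvSvAt trace (idx + 1) = 0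
        then some (idx : Int) else none) with
    | some i => simp
    | none => simp [hlast]

-- ===== VERDICT (by name: the statement is the Claim_ definition above) =====
theorem find_collapse_index_spec : Claim_equal_find_collapse_index := by
  intro trace _
  unfold Spec_find_collapse_index find_collapse_index find_collapse_index_alt
  rw [pvAltGo_eq]
  simp only [pvSvAt_eq_map]
  rw [double_scan_eq]
  cases hfind : (List.range' 1 (trace.length - 2)).findSome? (fun idx =>
      if pvSvAt trace (idx - 1) > 0 ∧ pvSvAt trace idx = 0 ∧ pvSvAt trace (idx + 1) = 0
      then some (idx : Int) else none) with
  | some i => rfl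
  | none => rfl
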